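-- pv_equiv track=rewrite | github.com/akhtarmdsaad/mindcanvas | code_traverser.py | valid_filename
-- ===== SOURCE A (Python) =====
-- def valid_filename(file_name):
--     extensions = ['.jsx', '.js', '.ts', '.tsx', '.json', '.html', '.css', '.scss']
--     """
--     Check if the file name to be processed or not.
--     """
--     flag = any(file_name.endswith(ext) for ext in extensions)
--     flag = flag and not "node_modules" in file_name
--     flag = flag and not "package-lock" in file_name
--     flag = flag and not "README" in file_name
--     return flag
-- ===== SOURCE B (Python) =====
-- def valid_filename(file_name):
--     """
--     Check if the file name to be processed or not.
--     """
--     extension_set = {'.jsx', '.js', '.ts', '.tsx', '.json', '.html', '.css', '.scss'}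
--     for bad in ('node_modules', 'package-lock', 'README'):
--         if bad in file_name:
--             return False
--     head, sep, tail = file_name.rpartition('.')
--     return sep == '.' and sep + tail in extension_set
-- ===== Notes on version B (the rewrite author's own statement) =====
-- stated objective: idiomatic
-- what changed: B returns early on the three exclusion substrings and then extracts the suffix after the last dot once (rpartition) and tests it against a set of extensions, instead of A's endswith scan over all 8 extensions followed by boolean masking.
import Mathlib
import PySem

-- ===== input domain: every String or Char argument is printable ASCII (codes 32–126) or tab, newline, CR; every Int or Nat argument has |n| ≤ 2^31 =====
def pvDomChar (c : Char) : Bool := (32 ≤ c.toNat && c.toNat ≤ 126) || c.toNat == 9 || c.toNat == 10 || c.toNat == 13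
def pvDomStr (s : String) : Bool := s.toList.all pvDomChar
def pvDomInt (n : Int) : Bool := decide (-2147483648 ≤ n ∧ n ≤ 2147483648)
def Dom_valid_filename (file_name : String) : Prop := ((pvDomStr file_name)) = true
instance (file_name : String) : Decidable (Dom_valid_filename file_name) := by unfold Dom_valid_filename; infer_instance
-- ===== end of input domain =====

-- B checks the three exclusions first, then extracts the suffix after the last dot once
-- (rpartition) and tests set membership, instead of scanning endswith for all 8 extensions
-- (idiomatic; same behaviour, proved equal on all inputs).


-- ===== PORT A =====
def valid_filename (file_name : String) : Bool :=
  let extensions : List String := [".jsx", ".js", ".ts", ".tsx", ".json", ".html", ".css", ".scss"]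
  let flag := extensions.any (fun ext => PySem.Str.endswith file_name ext)
  let flag := flag && !(PySem.Str.isIn "node_modules" file_name)
  let flag := flag && !(PySem.Str.isIn "package-lock" file_name)
  let flag := flag && !(PySem.Str.isIn "README" file_name)
  flag

-- ===== PORT B =====
-- B: exclusion substrings first (early return), then rpartition('.') — tail is the part of
-- file_name after the last '.', present iff '.' occurs — and one set-membership test.
def valid_filename_alt (file_name : String) : Bool :=
  let extension_set : PySem.Set String :=
    PySem.Set.ofList [".jsx", ".js", ".ts", ".tsx", ".json", ".html", ".css", ".scss"]
  if PySem.Str.isIn "node_modules" file_name then false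
  else if PySem.Str.isIn "package-lock" file_name then false
  else if PySem.Str.isIn "README" file_name then false
  else
    -- rpartition('.'): tail = chars after the last '.', sep found iff '.' ∈ file_name
    let cs := file_name.toList
    let tail := (cs.reverse.takeWhile (fun c => c != '.')).reverse
    decide ('.' ∈ cs) && extension_set.contains (String.ofList ('.' :: tail))

-- ===== PRECONDITION & SPEC =====
def Spec_valid_filename (file_name : String) (out : Bool) : Prop := out = valid_filename_alt file_name
instance (file_name : String) (out : Bool) : Decidable (Spec_valid_filename file_name out) := by unfold Spec_valid_filename; infer_instance

-- ===== CLAIM (what is proved, stated in full; the proofs are below) =====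
def Claim_equal_valid_filename : Prop := ∀ (file_name : String), Dom_valid_filename file_name → Spec_valid_filename file_name (valid_filename file_name)

-- ===== LEMMAS AND PROOFS =====

-- ends-with '.w' (w dot-free) is exactly: a dot occurs, and the part after the last dot is w.
lemma key : ∀ (w r : List Char), '.' ∉ w →
    ((w ++ ['.'] <+: r) ↔ ('.' ∈ r ∧ r.takeWhile (fun c => c != '.') = w)) := by
  intro w
  induction w with
  | nil =>
    intro r _
    cases r with
    | nil => simp
    | cons c rs =>
      by_cases hc : c = '.' <;>
        simp [List.cons_prefix_cons, hc, bne, Ne.symm]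
  | cons a w' ih =>
    intro r hw
    have ha : a ≠ '.' := fun h => hw (h ▸ List.mem_cons_self)
    have hw' : '.' ∉ w' := fun h => hw (List.mem_cons_of_mem _ h)
    cases r with
    | nil => simp
    | cons c rs =>
      by_cases hc : c = '.'
      · subst hc
        simp only [List.cons_append, List.cons_prefix_cons, List.takeWhile_cons, bne_self_eq_false,
          if_false, Bool.false_eq_true, reduceCtorEq, List.mem_cons]
        simp [ha]
      · have htw : List.takeWhile (fun c => c != '.') (c :: rs)
            = c :: List.takeWhile (fun c => c != '.') rs := by
          simp [hc]
        simp only [List.cons_append, List.cons_prefix_cons, htw, List.mem_cons, ih rs hw',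
          List.cons.injEq]
        constructor
        · rintro ⟨rfl, hmem, h⟩
          exact ⟨Or.inr hmem, rfl, h⟩
        · rintro ⟨hmem, rfl, h⟩
          exact ⟨rfl, hmem.resolve_left (fun hh => hc hh.symm), h⟩

-- one extension: endswith file_name ('.'::w) matches B's last-dot test
lemma ext_endswith (cs w : List Char) (hw : '.' ∉ w) :
    ('.' :: w <:+ cs) ↔ ('.' ∈ cs ∧ (cs.reverse.takeWhile (fun c => c != '.')).reverse = w) := by
  rw [← List.reverse_prefix]
  have : ('.' :: w).reverse = w.reverse ++ ['.'] := by simp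
  rw [this, key w.reverse cs.reverse (by simpa using hw)]
  constructor
  · rintro ⟨h1, h2⟩
    exact ⟨by simpa using h1, by simp [h2]⟩
  · rintro ⟨h1, h2⟩
    refine ⟨by simpa using h1, ?_⟩
    have := congrArg List.reverse h2
    simpa using this

-- ===== VERDICT (by name: the statement is the Claim_ definition above) =====
theorem valid_filename_spec : Claim_equal_valid_filename := by
  intro s _
  unfold Spec_valid_filename valid_filename valid_filename_alt
  cases h1 : PySem.Str.isIn "node_modules" s <;>
  cases h2 : PySem.Str.isIn "package-lock" s <;>
  cases h3 : PySem.Str.isIn "README" s <;>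
    simp [h1, h2, h3]
  rw [Bool.eq_iff_iff]
  simp only [Bool.or_eq_true, Bool.and_eq_true, decide_eq_true_eq, PySem.Chars.endswith_iff]
  rw [ext_endswith s.toList ['j','s','x'] (by decide), ext_endswith s.toList ['j','s'] (by decide),
    ext_endswith s.toList ['t','s'] (by decide), ext_endswith s.toList ['t','s','x'] (by decide),
    ext_endswith s.toList ['j','s','o','n'] (by decide),
    ext_endswith s.toList ['h','t','m','l'] (by decide),
    ext_endswith s.toList ['c','s','s'] (by decide),
    ext_endswith s.toList ['s','c','s','s'] (by decide)]
  simp only [String.ext_iff, String.toList_ofList]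
  generalize (List.takeWhile (fun c => c != '.') s.toList.reverse).reverse = t
  simp only [show (".jsx" : String).toList = ['.','j','s','x'] from rfl,
    show (".js" : String).toList = ['.','j','s'] from rfl,
    show (".ts" : String).toList = ['.','t','s'] from rfl,
    show (".tsx" : String).toList = ['.','t','s','x'] from rfl,
    show (".json" : String).toList = ['.','j','s','o','n'] from rfl,
    show (".html" : String).toList = ['.','h','t','m','l'] from rfl,
    show (".css" : String).toList = ['.','c','s','s'] from rfl,
    show (".scss" : String).toList = ['.','s','c','s','s'] from rfl,
    List.cons.injEq, true_and]
  tauto
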